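-- pv_equiv track=rewrite | github.com/aecwalker/PostfixManager | postfix-policy-server.py | is_recipient_allowed
-- ===== SOURCE A (Python) =====
-- def is_recipient_allowed(recipient, allowed_list):
--     for allowed in allowed_list:
--         if allowed.startswith('@'):
--             # Domain check
--             domain = allowed[1:]
--             if recipient.lower().endswith('@' + domain.lower()):
--                 return True
--         else:
--             # Exact email check
--             if recipient.lower() == allowed.lower():
--                 return True
--     return False
-- ===== SOURCE B (Python) =====
-- def is_recipient_allowed(recipient, allowed_list):
--     # Inverted traversal: index the allow-list once (lowercased), then instead
--     # of running endswith per entry, enumerate the '@'-positions of the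
--     # recipient and look each suffix starting there up by hash. A domain entry
--     # '@d' matches exactly when some suffix of recipient.lower() beginning at
--     # an '@' equals the lowered entry, so this is equivalent.
--     exact = set()
--     domains = set()
--     for a in allowed_list:
--         if a.startswith('@'):
--             domains.add(a.lower())
--         else:
--             exact.add(a.lower())
--     r = recipient.lower()
--     if r in exact:
--         return True
--     return any(r[i:] in domains for i, c in enumerate(r) if c == '@')
-- ===== Notes on version B (the rewrite author's own statement) =====
-- stated objective: faster
-- what changed: B inverts the traversal: it indexes the allow-list into two lowercased hash sets, then instead of A's per-entry endswith scan it enumerates the '@'-positions of the recipient and looks each such suffix up in the domain set, so no loop over the allow-list happens at query time.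
import Mathlib
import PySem

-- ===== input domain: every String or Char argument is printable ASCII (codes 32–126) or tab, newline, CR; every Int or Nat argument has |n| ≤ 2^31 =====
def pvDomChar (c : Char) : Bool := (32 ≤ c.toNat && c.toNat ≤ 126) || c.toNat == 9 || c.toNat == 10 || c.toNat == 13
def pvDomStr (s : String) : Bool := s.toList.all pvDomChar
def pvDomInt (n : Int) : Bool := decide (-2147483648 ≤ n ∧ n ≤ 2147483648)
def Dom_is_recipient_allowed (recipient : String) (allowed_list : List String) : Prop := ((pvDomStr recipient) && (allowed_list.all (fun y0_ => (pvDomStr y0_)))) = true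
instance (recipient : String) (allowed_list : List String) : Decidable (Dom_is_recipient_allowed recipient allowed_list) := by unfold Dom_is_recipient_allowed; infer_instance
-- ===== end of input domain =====

-- B inverts the traversal: the allow-list is indexed once into two lowercased
-- sets, then the '@'-positions of the recipient are enumerated and each such
-- suffix looked up in the domain set (no per-entry endswith scan); same result.


-- ===== PORT A =====
-- the for-loop with its early returns, entry by entry, on code-point lists
def pvLoopA (recipient : List Char) : List (List Char) → Bool
  | [] => false
  | allowed :: rest =>
    if PySem.Chars.startswith allowed ['@'] then
      -- domain check: domain = allowed[1:]; recipient.lower().endswith('@' + domain.lower())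
      let domain := PySem.List.slice allowed (some 1) none
      if PySem.Chars.endswith (PySem.Chars.lower recipient)
          (['@'] ++ PySem.Chars.lower domain) then true
      else pvLoopA recipient rest
    else
      -- exact email check: recipient.lower() == allowed.lower()
      if PySem.Chars.lower recipient == PySem.Chars.lower allowed then true
      else pvLoopA recipient rest

def is_recipient_allowed (recipient : String) (allowed_list : List String) : Bool :=
  pvLoopA recipient.toList (allowed_list.map String.toList)

-- ===== PORT B =====
-- one pass building the two sets (exact, domains)
def pvSetsB (xs : List (List Char)) : PySem.Set (List Char) × PySem.Set (List Char) :=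
  xs.foldl
    (fun st allowed =>
      if PySem.Chars.startswith allowed ['@'] then
        (st.1, st.2.add (PySem.Chars.lower allowed))
      else
        (st.1.add (PySem.Chars.lower allowed), st.2))
    (PySem.Set.ofList [], PySem.Set.ofList [])

-- any(r[i:] in domains for i, c in enumerate(r) if c == '@')
def is_recipient_allowed_alt (recipient : String) (allowed_list : List String) : Bool :=
  let st := pvSetsB (allowed_list.map String.toList)
  let r := PySem.Chars.lower recipient.toList
  if st.1.contains r then true
  else (PySem.List.enumerate r 0).any
    (fun p => p.2 == '@' && st.2.contains (PySem.List.slice r (some p.1) none))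

-- ===== PRECONDITION & SPEC =====
def Spec_is_recipient_allowed (recipient : String) (allowed_list : List String) (out : Bool) : Prop := out = is_recipient_allowed_alt recipient allowed_list
instance (recipient : String) (allowed_list : List String) (out : Bool) : Decidable (Spec_is_recipient_allowed recipient allowed_list out) := by unfold Spec_is_recipient_allowed; infer_instance

-- ===== CLAIM (what is proved, stated in full; the proofs are below) =====
def Claim_equal_is_recipient_allowed : Prop := ∀ (recipient : String) (allowed_list : List String), Dom_is_recipient_allowed recipient allowed_list → Spec_is_recipient_allowed recipient allowed_list (is_recipient_allowed recipient allowed_list)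

-- ===== LEMMAS AND PROOFS =====

-- the per-entry test A applies, as one boolean
def pvMatch (r : List Char) (a : List Char) : Bool :=
  if PySem.Chars.startswith a ['@'] then
    PySem.Chars.endswith (PySem.Chars.lower r) (['@'] ++ PySem.Chars.lower (PySem.List.slice a (some 1) none))
  else PySem.Chars.lower r == PySem.Chars.lower a

theorem pvLoopA_eq_any (r : List Char) (xs : List (List Char)) :
    pvLoopA r xs = xs.any (pvMatch r) := by
  induction xs with
  | nil => rfl
  | cons a rest ih =>
    simp only [pvLoopA, pvMatch, List.any_cons, ih]
    split_ifs <;> simp_all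

-- for an entry starting with '@', A's suffix '@' + allowed[1:].lower() is allowed.lower()
theorem pvSuffix_eq (a : List Char) (h : PySem.Chars.startswith a ['@'] = true) :
    ['@'] ++ PySem.Chars.lower (PySem.List.slice a (some 1) none) = PySem.Chars.lower a := by
  rw [PySem.Chars.startswith_iff] at h
  obtain ⟨t, rfl⟩ := h
  rw [PySem.List.slice_from _ (by norm_num)]
  simp [PySem.Chars.lower, PySem.Chars.lowerChar, PySem.Chars.isupper]

-- membership characterisation of the two sets B builds
theorem pvSetsB_mem (xs : List (List Char)) (y : List Char) :
    (y ∈ (pvSetsB xs).1 ↔ ∃ a ∈ xs, PySem.Chars.startswith a ['@'] = false ∧ y = PySem.Chars.lower a) ∧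
    (y ∈ (pvSetsB xs).2 ↔ ∃ a ∈ xs, PySem.Chars.startswith a ['@'] = true ∧ y = PySem.Chars.lower a) := by
  suffices h : ∀ (e d : PySem.Set (List Char)),
      (y ∈ (xs.foldl (fun st allowed =>
        if PySem.Chars.startswith allowed ['@'] then (st.1, st.2.add (PySem.Chars.lower allowed))
        else (st.1.add (PySem.Chars.lower allowed), st.2)) (e, d)).1 ↔
        y ∈ e ∨ ∃ a ∈ xs, PySem.Chars.startswith a ['@'] = false ∧ y = PySem.Chars.lower a) ∧
      (y ∈ (xs.foldl (fun st allowed =>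
        if PySem.Chars.startswith allowed ['@'] then (st.1, st.2.add (PySem.Chars.lower allowed))
        else (st.1.add (PySem.Chars.lower allowed), st.2)) (e, d)).2 ↔
        y ∈ d ∨ ∃ a ∈ xs, PySem.Chars.startswith a ['@'] = true ∧ y = PySem.Chars.lower a) by
    have := h (PySem.Set.ofList []) (PySem.Set.ofList [])
    simpa [pvSetsB, PySem.Set.ofList_nil] using this
  induction xs with
  | nil => intro e d; simp
  | cons a rest ih =>
    intro e d
    by_cases h : PySem.Chars.startswith a ['@'] = true
    · constructor
      · rw [List.foldl_cons]; simp only [h, if_true]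
        rw [(ih e (d.add (PySem.Chars.lower a))).1]
        constructor
        · rintro (he | ⟨b, hb, hb1, hb2⟩)
          · exact Or.inl he
          · exact Or.inr ⟨b, List.mem_cons_of_mem _ hb, hb1, hb2⟩
        · rintro (he | ⟨b, hb, hb1, hb2⟩)
          · exact Or.inl he
          · rcases List.mem_cons.mp hb with rfl | hb
            · rw [h] at hb1; exact absurd hb1 (by simp)
            · exact Or.inr ⟨b, hb, hb1, hb2⟩
      · rw [List.foldl_cons]; simp only [h, if_true]
        rw [(ih e (d.add (PySem.Chars.lower a))).2, PySem.Set.mem_add]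
        constructor
        · rintro ((he | hy) | ⟨b, hb, hb1, hb2⟩)
          · exact Or.inl he
          · exact Or.inr ⟨a, by simp, h, hy⟩
          · exact Or.inr ⟨b, List.mem_cons_of_mem _ hb, hb1, hb2⟩
        · rintro (he | ⟨b, hb, hb1, hb2⟩)
          · exact Or.inl (Or.inl he)
          · rcases List.mem_cons.mp hb with rfl | hb
            · exact Or.inl (Or.inr hb2)
            · exact Or.inr ⟨b, hb, hb1, hb2⟩
    · replace h : PySem.Chars.startswith a ['@'] = false := by simpa using h
      constructor
      · rw [List.foldl_cons]; simp only [h, Bool.false_eq_true, if_false]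
        rw [(ih (e.add (PySem.Chars.lower a)) d).1, PySem.Set.mem_add]
        constructor
        · rintro ((he | hy) | ⟨b, hb, hb1, hb2⟩)
          · exact Or.inl he
          · exact Or.inr ⟨a, by simp, h, hy⟩
          · exact Or.inr ⟨b, List.mem_cons_of_mem _ hb, hb1, hb2⟩
        · rintro (he | ⟨b, hb, hb1, hb2⟩)
          · exact Or.inl (Or.inl he)
          · rcases List.mem_cons.mp hb with rfl | hb
            · exact Or.inl (Or.inr hb2)
            · exact Or.inr ⟨b, hb, hb1, hb2⟩
      · rw [List.foldl_cons]; simp only [h, Bool.false_eq_true, if_false]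
        rw [(ih (e.add (PySem.Chars.lower a)) d).2]
        constructor
        · rintro (he | ⟨b, hb, hb1, hb2⟩)
          · exact Or.inl he
          · exact Or.inr ⟨b, List.mem_cons_of_mem _ hb, hb1, hb2⟩
        · rintro (he | ⟨b, hb, hb1, hb2⟩)
          · exact Or.inl he
          · rcases List.mem_cons.mp hb with rfl | hb
            · rw [h] at hb1; exact absurd hb1.symm (by simp)
            · exact Or.inr ⟨b, hb, hb1, hb2⟩

-- lower of an entry starting with '@' starts with '@' and is nonempty
theorem pvLower_at (t : List Char) :
    PySem.Chars.lower ('@' :: t) = '@' :: PySem.Chars.lower t := by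
  simp [PySem.Chars.lower, PySem.Chars.lowerChar, PySem.Chars.isupper]

-- the suffixes of rl that B's enumerate-loop finds are exactly the suffixes
-- beginning with '@': endswith rl s for s = '@'::_ iff some '@'-position
-- suffix of rl equals s
theorem pvSuffix_at_iff (rl s : List Char) (hs : ∃ u, s = '@' :: u) :
    s <:+ rl ↔ ∃ (k : Nat) (h : k < rl.length), rl[k] = '@' ∧ rl.drop k = s := by
  constructor
  · rintro ⟨t, rfl⟩
    obtain ⟨u, rfl⟩ := hs
    refine ⟨t.length, by simp, ?_, ?_⟩
    · simp [List.getElem_append_right]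
    · simp
  · rintro ⟨k, hk, _, rfl⟩
    exact ⟨rl.take k, by simp⟩

-- ===== VERDICT (by name: the statement is the Claim_ definition above) =====
theorem is_recipient_allowed_spec : Claim_equal_is_recipient_allowed := by
  intro recipient allowed_list _
  unfold Spec_is_recipient_allowed
  unfold is_recipient_allowed is_recipient_allowed_alt
  rw [pvLoopA_eq_any]
  have hmemE := fun y => (pvSetsB_mem (allowed_list.map String.toList) y).1
  have hmemD := fun y => (pvSetsB_mem (allowed_list.map String.toList) y).2
  set rl := PySem.Chars.lower recipient.toList with hrl
  by_cases hE : (pvSetsB (allowed_list.map String.toList)).1.contains rl = true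
  · -- exact match found: some entry makes A's per-entry test true
    rw [if_pos hE]
    rw [PySem.Set.contains_iff] at hE
    obtain ⟨a, ha, ha1, ha2⟩ := (hmemE _).mp hE
    rw [List.any_eq_true]
    exact ⟨a, ha, by simp [pvMatch, ha1, ← hrl, ha2]⟩
  · rw [if_neg hE, Bool.eq_iff_iff, List.any_eq_true, List.any_eq_true]
    constructor
    · rintro ⟨a, ha, hm⟩
      unfold pvMatch at hm
      by_cases hsw : PySem.Chars.startswith a ['@'] = true
      · rw [if_pos hsw, pvSuffix_eq a hsw, ← hrl, PySem.Chars.endswith_iff] at hm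
        have hs : ∃ u, PySem.Chars.lower a = '@' :: u := by
          obtain ⟨t, rfl⟩ := (PySem.Chars.startswith_iff _ _).mp hsw
          exact ⟨PySem.Chars.lower t, pvLower_at t⟩
        obtain ⟨k, hk, hat, hdrop⟩ := (pvSuffix_at_iff rl _ hs).mp hm
        refine ⟨(↑k, rl[k]), ?_, ?_⟩
        · rw [PySem.List.mem_enumerate_iff]; exact ⟨k, hk, by simp⟩
        · simp only [hat, beq_self_eq_true, Bool.true_and]
          rw [PySem.List.slice_from_natCast, hdrop, PySem.Set.contains_iff]
          exact (hmemD _).mpr ⟨a, ha, hsw, rfl⟩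
      · rw [if_neg hsw, ← hrl] at hm
        exact absurd ((PySem.Set.contains_iff _ _).mpr
          ((hmemE _).mpr ⟨a, ha, by simpa using hsw, by simpa using hm⟩)) hE
    · rintro ⟨p, hp, hm⟩
      rw [PySem.List.mem_enumerate_iff] at hp
      obtain ⟨k, hk, rfl⟩ := hp
      simp only [Bool.and_eq_true, beq_iff_eq] at hm
      obtain ⟨hat, hD⟩ := hm
      rw [show ((0 : Int) + ↑k) = (↑k : Int) by ring, PySem.List.slice_from_natCast,
        PySem.Set.contains_iff] at hD
      obtain ⟨a, ha, ha1, hdrop⟩ := (hmemD _).mp hD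
      refine ⟨a, ha, ?_⟩
      simp only [pvMatch, if_pos ha1, pvSuffix_eq a ha1, ← hrl]
      rw [PySem.Chars.endswith_iff, ← hdrop]
      exact ⟨rl.take k, by simp⟩
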